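-- pv_equiv track=rewrite | github.com/AI-for-Infrastructure-Management/imp-act-starter-kit | examples/pymarl_imp_marl/envs/pymarl_ma.py | get_nested_list
-- ===== SOURCE A (Python) =====
-- def get_nested_list(flat_list, pattern):
--     """Structures a flat list into a nested list following a specific size pattern."""
--     nested_list = []
--     start_index = 0
--     for size in pattern:
--         end_index = start_index + size
--         nested_list.append(flat_list[start_index:end_index])
--         start_index = end_index
--     return nested_list
-- ===== SOURCE B (Python) =====
-- def get_nested_list(flat_list, pattern):
--     """Structures a flat list into a nested list following a specific size pattern."""
--     bounds = [0]
--     for size in pattern: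
--         bounds.append(bounds[-1] + size)
--     return [flat_list[bounds[i]:bounds[i + 1]] for i in range(len(pattern))]
-- ===== Notes on version B (the rewrite author's own statement) =====
-- stated objective: alternative
-- what changed: B first materialises all cut boundaries as a prefix-sum list, then maps each consecutive boundary pair to a slice in a second pass, instead of A's single loop carrying a running start index and appending slices as it goes.
import Mathlib
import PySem

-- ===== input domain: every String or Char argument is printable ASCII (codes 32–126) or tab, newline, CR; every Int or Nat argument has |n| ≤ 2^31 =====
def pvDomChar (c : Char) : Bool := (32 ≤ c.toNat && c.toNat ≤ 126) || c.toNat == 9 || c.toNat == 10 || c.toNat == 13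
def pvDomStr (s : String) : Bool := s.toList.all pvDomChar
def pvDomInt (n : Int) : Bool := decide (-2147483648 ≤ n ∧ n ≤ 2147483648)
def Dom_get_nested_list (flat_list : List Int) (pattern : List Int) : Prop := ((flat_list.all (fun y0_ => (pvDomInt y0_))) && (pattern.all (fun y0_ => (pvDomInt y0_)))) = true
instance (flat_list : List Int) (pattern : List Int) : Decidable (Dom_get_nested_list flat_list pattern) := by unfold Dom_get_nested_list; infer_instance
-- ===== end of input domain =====

-- B builds the full prefix-sum boundary list first, then slices each consecutive boundary pair
-- in a second pass; A keeps a running start index and appends slices inside one loop. Same cost.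

-- ===== PORT A =====
-- loop state: (nested_list, start_index)
def get_nested_list (flat_list : List Int) (pattern : List Int) : List (List Int) :=
  (pattern.foldl
    (fun (st : List (List Int) × Int) size =>
      (st.1 ++ [PySem.List.slice flat_list (some st.2) (some (st.2 + size))], st.2 + size))
    ([], 0)).1

-- ===== PORT B =====
-- bounds = [0]; for size in pattern: bounds.append(bounds[-1] + size)
def pvBounds (pattern : List Int) : List Int :=
  pattern.foldl (fun bs size => bs ++ [bs.getLastD 0 + size]) [0]

def get_nested_list_alt (flat_list : List Int) (pattern : List Int) : List (List Int) :=
  let bounds := pvBounds pattern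
  (List.range pattern.length).map
    (fun i => PySem.List.slice flat_list (some (bounds.getD i 0)) (some (bounds.getD (i + 1) 0)))

-- ===== PRECONDITION & SPEC =====
def Spec_get_nested_list (flat_list : List Int) (pattern : List Int) (out : List (List Int)) : Prop := out = get_nested_list_alt flat_list pattern
instance (flat_list : List Int) (pattern : List Int) (out : List (List Int)) : Decidable (Spec_get_nested_list flat_list pattern out) := by unfold Spec_get_nested_list; infer_instance

-- ===== CLAIM (what is proved, stated in full; the proofs are below) =====
def Claim_equal_get_nested_list : Prop := ∀ (flat_list : List Int) (pattern : List Int), Dom_get_nested_list flat_list pattern → Spec_get_nested_list flat_list pattern (get_nested_list flat_list pattern)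

-- ===== LEMMAS AND PROOFS =====

/-- common recursive characterisation of the nesting. -/
def pvChunks (flat_list : List Int) (start : Int) : List Int → List (List Int)
  | [] => []
  | s :: p => PySem.List.slice flat_list (some start) (some (start + s)) :: pvChunks flat_list (start + s) p

theorem getNested_foldl_eq (flat_list : List Int) (pattern : List Int) :
    ∀ (acc : List (List Int)) (start : Int),
    (pattern.foldl
      (fun (st : List (List Int) × Int) size =>
        (st.1 ++ [PySem.List.slice flat_list (some st.2) (some (st.2 + size))], st.2 + size))
      (acc, start)).1 = acc ++ pvChunks flat_list start pattern := by
  induction pattern with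
  | nil => intro acc start; simp [pvChunks]
  | cons s p ih =>
      intro acc start
      simp only [List.foldl_cons, pvChunks]
      rw [ih]
      simp

theorem pvBounds_foldl_eq (pattern : List Int) :
    ∀ (bs : List Int) (b : Int),
    pattern.foldl (fun bs size => bs ++ [bs.getLastD 0 + size]) (bs ++ [b])
      = bs ++ List.scanl (· + ·) b pattern := by
  induction pattern with
  | nil => intro bs b; simp [List.scanl]
  | cons s p ih =>
      intro bs b
      simp only [List.foldl_cons, List.scanl]
      have h : (bs ++ [b]).getLastD 0 = b := by simp
      rw [h]
      have := ih (bs ++ [b]) (b + s)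
      simpa using this

theorem pvBounds_eq_scanl (pattern : List Int) :
    pvBounds pattern = List.scanl (· + ·) 0 pattern := by
  have := pvBounds_foldl_eq pattern [] 0
  simpa [pvBounds] using this

theorem alt_map_eq (flat_list : List Int) (pattern : List Int) :
    ∀ (b : Int),
    (List.range pattern.length).map
      (fun i => PySem.List.slice flat_list
        (some ((List.scanl (· + ·) b pattern).getD i 0))
        (some ((List.scanl (· + ·) b pattern).getD (i + 1) 0)))
      = pvChunks flat_list b pattern := by
  induction pattern with
  | nil => intro b; simp [pvChunks]
  | cons s p ih =>
      intro b
      simp only [List.length_cons, List.range_succ_eq_map, List.map_cons, List.map_map,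
        List.scanl_cons, pvChunks]
      congr 1
      · simp
      · rw [← ih (b + s)]
        apply List.map_congr_left
        intro i _
        simp

-- ===== VERDICT (by name: the statement is the Claim_ definition above) =====
theorem get_nested_list_spec : Claim_equal_get_nested_list := by
  intro flat_list pattern _
  unfold Spec_get_nested_list get_nested_list get_nested_list_alt
  rw [getNested_foldl_eq flat_list pattern [] 0, pvBounds_eq_scanl,
    alt_map_eq flat_list pattern 0]
  simp
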